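-- pv_equiv track=rewrite | github.com/RobertsScetinins/aoc_2024 | solutions/puzzle_7/sol.py | solve
-- ===== SOURCE A (Python) =====
-- from itertools import product
--
-- def combine(numbers: list[int], operations: list[str]) -> int:
--     total = numbers[0]
--     for n, operation in enumerate(operations):
--         if operation == "+":
--             total += numbers[n+1]
--         elif operation == "*":
--             total *= numbers[n+1]
--         elif operation == "||":
--             total = int(str(total) + str(numbers[n+1]))
--     return total
--
-- def solve(data: list[tuple[int, list[int]]], operations: list[str]) -> int:
--     total = 0
--
--     for i in data:
--         target = i[0]
--         numbers = i[1]
--         combinations = list(product(operations, repeat=len(numbers)-1))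
--         for combination in combinations:
--             if target == combine(numbers, combination):
--                 total += target
--                 break
--     return total
-- ===== SOURCE B (Python) =====
-- def _apply(v, op, x):
--     if op == "+":
--         return v + x
--     elif op == "*":
--         return v * x
--     elif op == "||":
--         return int(str(v) + str(x))
--     else:
--         return v
--
--
-- def solve(data, operations):
--     total = 0
--     for target, numbers in data:
--         if not numbers:
--             continue
--         reach = {numbers[0]}
--         for x in numbers[1:]:
--             nxt = set()
--             for v in reach:
--                 for op in operations:
--                     nxt.add(_apply(v, op, x))
--             reach = nxt
--         if target in reach:
--             total += target
--     return total
-- ===== Notes on version B (the rewrite author's own statement) =====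
-- stated objective: alternative
-- what changed: Replaces per-row enumeration of all len(operations)^(n-1) operator combinations (itertools.product + re-evaluating combine for each) by an incremental reachable-value set DP: one left-to-right pass per row maintaining the deduplicated set of values obtainable so far, then a single membership test against the target; deduplication makes B much faster when few operator strings are arithmetic, but reachable sets can still grow exponentially in the worst case, so no speed is claimed.
-- outside the precondition, e.g. on solve([(1, [2, -1])], ['+', '||']): A returns 1, B raises ValueError
import Mathlib
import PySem

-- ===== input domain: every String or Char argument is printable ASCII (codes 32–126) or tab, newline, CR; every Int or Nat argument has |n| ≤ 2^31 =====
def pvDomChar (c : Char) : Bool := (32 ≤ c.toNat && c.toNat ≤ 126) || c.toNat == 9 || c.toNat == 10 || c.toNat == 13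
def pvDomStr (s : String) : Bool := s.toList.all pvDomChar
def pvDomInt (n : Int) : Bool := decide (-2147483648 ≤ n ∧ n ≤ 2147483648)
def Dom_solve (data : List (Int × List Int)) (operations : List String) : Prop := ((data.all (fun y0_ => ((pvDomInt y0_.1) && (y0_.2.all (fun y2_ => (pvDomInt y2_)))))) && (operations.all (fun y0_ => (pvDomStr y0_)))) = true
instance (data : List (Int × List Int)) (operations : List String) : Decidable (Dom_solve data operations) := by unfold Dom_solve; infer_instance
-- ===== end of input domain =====

-- B replaces A's per-row enumeration of all operator combinations by an incremental
-- reachable-value set DP (deduplicated set of obtainable values, one pass per row).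


-- ===== PORT A =====
-- int(str(a) + str(b)); exact under Pre_solve (there both arguments' digits concatenate
-- to a valid int literal, so ofChars? never returns none).
def pyConcat (a b : Int) : Int :=
  (PySem.Int.ofChars? (PySem.Int.toChars a ++ PySem.Int.toChars b)).getD 0

def combine (numbers : List Int) (operations : List String) : Int :=
  (PySem.List.enumerate operations).foldl
    (fun total p =>
      if p.2 == "+" then total + PySem.List.pyGetD numbers (p.1 + 1) 0
      else if p.2 == "*" then total * PySem.List.pyGetD numbers (p.1 + 1) 0
      else if p.2 == "||" then pyConcat total (PySem.List.pyGetD numbers (p.1 + 1) 0)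
      else total)
    (PySem.List.pyGetD numbers 0 0)

-- list(product(operations, repeat=n)) in itertools order (first position varies slowest)
def prodRep (operations : List String) : Nat → List (List String)
  | 0 => [[]]
  | n + 1 => operations.flatMap (fun o => (prodRep operations n).map (fun c => o :: c))

-- the inner 'for combination in combinations: if target == combine(...): ...; break'
def scanCombos (target : Int) (numbers : List Int) : List (List String) → Bool
  | [] => false
  | c :: rest => if target == combine numbers c then true else scanCombos target numbers rest

def solve (data : List (Int × List Int)) (operations : List String) : Int :=
  data.foldl
    (fun total i =>
      if scanCombos i.1 i.2 (prodRep operations (i.2.length - 1)) then total + i.1 else total)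
    0

-- ===== PORT B =====
def applyOp (v : Int) (op : String) (x : Int) : Int :=
  if op == "+" then v + x
  else if op == "*" then v * x
  else if op == "||" then pyConcat v x
  else v

def reachAfter (operations : List String) (start : PySem.Set Int) (xs : List Int) : PySem.Set Int :=
  xs.foldl
    (fun reach x =>
      reach.foldl
        (fun nxt v => operations.foldl (fun nxt op => PySem.Set.add nxt (applyOp v op x)) nxt)
        PySem.Set.empty)
    start

def solve_alt (data : List (Int × List Int)) (operations : List String) : Int :=
  data.foldl
    (fun total i =>
      match i.2 with
      | [] => total
      | h :: t =>
          if PySem.Set.contains (reachAfter operations (PySem.Set.ofList [h]) t) i.1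
          then total + i.1
          else total)
    0

-- ===== PRECONDITION & SPEC =====
-- Pre_ excludes exactly the inputs where the Python A raises: a row with an empty number
-- list (product(..., repeat=-1) raises ValueError), and rows where '||' may concatenate a
-- negative number (int('..-..') raises ValueError); the latter over-approximates A's raise
-- set, since A may break on an earlier matching combination and still return (see cites).
def Pre_solve (data : List (Int × List Int)) (operations : List String) : Prop :=
  ∀ p ∈ data, p.2 ≠ [] ∧ ("||" ∈ operations → ∀ x ∈ p.2.tail, 0 ≤ x)
instance (data : List (Int × List Int)) (operations : List String) : Decidable (Pre_solve data operations) := by unfold Pre_solve; infer_instance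

def pvWitness_solve : (List (Int × List Int)) × List String := ([(5, [2, 3])], ["+", "*"])

def Spec_solve (data : List (Int × List Int)) (operations : List String) (out : Int) : Prop := out = solve_alt data operations
instance (data : List (Int × List Int)) (operations : List String) (out : Int) : Decidable (Spec_solve data operations out) := by unfold Spec_solve; infer_instance

-- ===== CLAIM (what is proved, stated in full; the proofs are below) =====
def Claim_equal_solve : Prop := ∀ (data : List (Int × List Int)) (operations : List String), Dom_solve data operations → Pre_solve data operations → Spec_solve data operations (solve data operations)

-- ===== LEMMAS AND PROOFS =====

-- applying the operator chain c to the successive numbers t, seeded with v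
def foldStep (v : Int) : List String → List Int → Int
  | op :: c, x :: t => foldStep (applyOp v op x) c t
  | _, _ => v

theorem combine_fold (numbers : List Int) :
    ∀ (c : List String) (k : Nat) (v : Int), k + 1 + c.length ≤ numbers.length →
    (PySem.List.enumerate c (k : Int)).foldl
      (fun total p =>
        if p.2 == "+" then total + PySem.List.pyGetD numbers (p.1 + 1) 0
        else if p.2 == "*" then total * PySem.List.pyGetD numbers (p.1 + 1) 0
        else if p.2 == "||" then pyConcat total (PySem.List.pyGetD numbers (p.1 + 1) 0)
        else total) v
    = foldStep v c (numbers.drop (k + 1)) := by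
  intro c
  induction c with
  | nil => intro k v h; simp [PySem.List.enumerate, foldStep]
  | cons op c ih =>
    intro k v h
    have hk : k + 1 < numbers.length := by simp at h; omega
    have hidx : ((k : Int) + 1) = ((k + 1 : Nat) : Int) := by push_cast; ring
    have hget : PySem.List.pyGetD numbers ((k : Int) + 1) 0 = numbers[k + 1] := by
      rw [hidx, PySem.List.pyGetD_natCast, List.getD_eq_getElem _ _ hk]
    have hdrop : numbers.drop (k + 1) = numbers[k + 1] :: numbers.drop (k + 2) :=
      List.drop_eq_getElem_cons hk
    have henum : PySem.List.enumerate (op :: c) (k : Int)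
        = ((k : Int), op) :: PySem.List.enumerate c ((k : Int) + 1) := by
      simp [PySem.List.enumerate]
    rw [henum, List.foldl_cons, hdrop]
    have hcast : ((k : Int) + 1) = ((k + 1 : Nat) : Int) := hidx
    rw [show (PySem.List.enumerate c ((k : Int) + 1)) = PySem.List.enumerate c ((k + 1 : Nat) : Int) by rw [hcast]]
    rw [ih (k + 1) _ (by simp at h ⊢; omega)]
    simp only [foldStep, hget, applyOp]

theorem combine_eq (h : Int) (t : List Int) (c : List String) (hc : c.length = t.length) :
    combine (h :: t) c = foldStep h c t := by
  unfold combine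
  have h0 : PySem.List.pyGetD (h :: t) 0 0 = h := by
    simp
  have := combine_fold (h :: t) c 0 (PySem.List.pyGetD (h :: t) 0 0)
    (by simp; omega)
  simpa [h0, hc] using this

theorem length_of_mem_prodRep (ops : List String) :
    ∀ (n : Nat) (c : List String), c ∈ prodRep ops n → c.length = n := by
  intro n
  induction n with
  | zero => intro c hc; simp [prodRep] at hc; simp [hc]
  | succ n ih =>
    intro c hc
    simp [prodRep] at hc
    obtain ⟨o, _, c', hc', rfl⟩ := hc
    simp [ih c' hc']

theorem mem_prodRep_succ (ops : List String) (n : Nat) (c' : List String) :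
    c' ∈ prodRep ops (n + 1) ↔ ∃ op ∈ ops, ∃ c ∈ prodRep ops n, c' = op :: c := by
  simp [prodRep, eq_comm]

theorem scan_iff (target : Int) (numbers : List Int) :
    ∀ (cs : List (List String)),
      scanCombos target numbers cs = true ↔ ∃ c ∈ cs, target = combine numbers c := by
  intro cs
  induction cs with
  | nil => simp [scanCombos]
  | cons c rest ih =>
    simp only [scanCombos]
    split
    · next hb => simp only [beq_iff_eq] at hb; simp [hb]
    · next hb =>
      simp only [beq_iff_eq] at hb
      simp [ih]
      tauto

theorem mem_opsFold (ops : List String) (v x y : Int) :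
    ∀ (nxt : PySem.Set Int),
      y ∈ ops.foldl (fun N op => PySem.Set.add N (applyOp v op x)) nxt ↔
        y ∈ nxt ∨ ∃ op ∈ ops, y = applyOp v op x := by
  induction ops with
  | nil => simp
  | cons op ops ih =>
    intro nxt
    simp only [List.foldl_cons, ih, PySem.Set.mem_add, List.mem_cons]
    constructor
    · rintro (⟨h | h⟩ | ⟨o, ho, h⟩)
      · exact Or.inl h
      · exact Or.inr ⟨op, Or.inl rfl, h⟩
      · exact Or.inr ⟨o, Or.inr ho, h⟩
    · rintro (h | ⟨o, (rfl | ho), h⟩)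
      · exact Or.inl (Or.inl h)
      · exact Or.inl (Or.inr h)
      · exact Or.inr ⟨o, ho, h⟩

theorem mem_setFold (ops : List String) (x y : Int) :
    ∀ (S : List Int) (nxt : PySem.Set Int),
      y ∈ S.foldl
          (fun nxt v => ops.foldl (fun N op => PySem.Set.add N (applyOp v op x)) nxt) nxt ↔
        y ∈ nxt ∨ ∃ v ∈ S, ∃ op ∈ ops, y = applyOp v op x := by
  intro S
  induction S with
  | nil => simp
  | cons v S ih =>
    intro nxt
    simp only [List.foldl_cons, ih, mem_opsFold, List.mem_cons]
    constructor
    · rintro (⟨h | ⟨o, ho, h⟩⟩ | ⟨u, hu, o, ho, h⟩)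
      · exact Or.inl h
      · exact Or.inr ⟨v, Or.inl rfl, o, ho, h⟩
      · exact Or.inr ⟨u, Or.inr hu, o, ho, h⟩
    · rintro (h | ⟨u, (rfl | hu), o, ho, h⟩)
      · exact Or.inl (Or.inl h)
      · exact Or.inl (Or.inr ⟨o, ho, h⟩)
      · exact Or.inr ⟨u, hu, o, ho, h⟩

theorem mem_reachAfter (ops : List String) (y : Int) :
    ∀ (xs : List Int) (S : PySem.Set Int),
      y ∈ reachAfter ops S xs ↔
        ∃ v ∈ S, ∃ c ∈ prodRep ops xs.length, y = foldStep v c xs := by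
  intro xs
  induction xs with
  | nil =>
    intro S
    simp [reachAfter, prodRep, foldStep]
  | cons x t ih =>
    intro S
    have hstep : reachAfter ops S (x :: t)
        = reachAfter ops
            (S.foldl (fun nxt v =>
              ops.foldl (fun N op => PySem.Set.add N (applyOp v op x)) nxt) PySem.Set.empty) t := by
      simp [reachAfter]
    rw [hstep, ih]
    constructor
    · rintro ⟨u, hu, c, hc, rfl⟩
      rw [mem_setFold] at hu
      rcases hu with h | ⟨v, hv, o, ho, rfl⟩
      · simp [PySem.Set.empty] at h
      · refine ⟨v, hv, o :: c, ?_, rfl⟩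
        rw [List.length_cons, mem_prodRep_succ]
        exact ⟨o, ho, c, hc, rfl⟩
    · rintro ⟨v, hv, c', hc', rfl⟩
      rw [List.length_cons, mem_prodRep_succ] at hc'
      obtain ⟨o, ho, c, hc, rfl⟩ := hc'
      refine ⟨applyOp v o x, ?_, c, hc, rfl⟩
      rw [mem_setFold]
      exact Or.inr ⟨v, hv, o, ho, rfl⟩

theorem row_eq (ops : List String) (target h : Int) (t : List Int) :
    scanCombos target (h :: t) (prodRep ops ((h :: t).length - 1))
      = PySem.Set.contains (reachAfter ops (PySem.Set.ofList [h]) t) target := by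
  have hl : (h :: t).length - 1 = t.length := by simp
  rw [hl]
  rcases Bool.eq_false_or_eq_true (PySem.Set.contains (reachAfter ops (PySem.Set.ofList [h]) t) target) with hb | hb <;> rw [hb]
  · rw [scan_iff]
    simp only [PySem.Set.contains, List.contains_iff_mem] at hb
    rw [mem_reachAfter] at hb
    obtain ⟨v, hv, c, hc, rfl⟩ := hb
    simp only [PySem.Set.mem_ofList, List.mem_singleton] at hv
    subst hv
    exact ⟨c, hc, (combine_eq v t c (length_of_mem_prodRep ops t.length c hc)).symm⟩
  · rw [← Bool.not_eq_true] at hb ⊢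
    intro hs
    apply hb
    rw [scan_iff] at hs
    obtain ⟨c, hc, hcomb⟩ := hs
    have hlen := length_of_mem_prodRep ops t.length c hc
    rw [combine_eq h t c hlen] at hcomb
    simp only [PySem.Set.contains, List.contains_iff_mem]
    rw [mem_reachAfter]
    exact ⟨h, by simp [PySem.Set.mem_ofList], c, hc, hcomb⟩

theorem fold_eq (ops : List String) :
    ∀ (data : List (Int × List Int)) (t0 : Int), (∀ p ∈ data, p.2 ≠ []) →
      data.foldl
        (fun total i =>
          if scanCombos i.1 i.2 (prodRep ops (i.2.length - 1)) then total + i.1 else total) t0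
      = data.foldl
        (fun total i =>
          match i.2 with
          | [] => total
          | h :: t =>
              if PySem.Set.contains (reachAfter ops (PySem.Set.ofList [h]) t) i.1
              then total + i.1 else total) t0 := by
  intro data
  induction data with
  | nil => intro t0 _; rfl
  | cons p rest ih =>
    intro t0 hp
    obtain ⟨h, t, hpt⟩ : ∃ h t, p.2 = h :: t := by
      cases hpp : p.2 with
      | nil => exact absurd hpp (hp p (List.mem_cons_self ..))
      | cons h t => exact ⟨h, t, rfl⟩
    simp only [List.foldl_cons]
    rw [hpt, row_eq]
    exact ih _ (fun q hq => hp q (List.mem_cons_of_mem _ hq))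

-- ===== VERDICT (by name: the statement is the Claim_ definition above) =====
theorem solve_spec : Claim_equal_solve := by
  intro data operations _ hpre
  unfold Spec_solve solve solve_alt
  exact fold_eq operations data 0 (fun p hp => (hpre p hp).1)
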